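-- pv_equiv track=rewrite | github.com/Niebowziemii/AI-2-Semester | Algorithms-And-Data-Structures/Project 1/Rafał Stachowiak ex1.py | count
-- ===== SOURCE A (Python) =====
-- def count(elements,maximum):
--     wynik = [0 for i in range(len(elements))]
--     counter = [0 for i in range(maximum+1)]
--     for element in elements:
--         counter[element]+=1
--     for i in range(1,len(counter)):
--         counter[i] +=counter[i-1]
--     for i in range(len(elements)):
--         wynik[counter[elements[i]]-1] = elements[i]
--         counter[elements[i]]-=1
--     return wynik
-- ===== SOURCE B (Python) =====
-- def count(elements, maximum):
--     counter = [0 for i in range(maximum + 1)]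
--     for element in elements:
--         counter[element] += 1
--     wynik = []
--     for v in range(maximum + 1):
--         wynik.extend([v] * counter[v])
--     return wynik
-- ===== Notes on version B (the rewrite author's own statement) =====
-- stated objective: simpler
-- what changed: Replaces A's prefix-sum pass and reverse stable-placement pass (writing each element into a preallocated output slot) with a direct value-domain expansion: after the counting pass, emit each value v repeated counter[v] times, which yields the sorted output immediately.
-- outside the precondition, e.g. on count([-1, 2], 2): A returns [2, -1], B returns [2, 2]
import Mathlib
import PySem

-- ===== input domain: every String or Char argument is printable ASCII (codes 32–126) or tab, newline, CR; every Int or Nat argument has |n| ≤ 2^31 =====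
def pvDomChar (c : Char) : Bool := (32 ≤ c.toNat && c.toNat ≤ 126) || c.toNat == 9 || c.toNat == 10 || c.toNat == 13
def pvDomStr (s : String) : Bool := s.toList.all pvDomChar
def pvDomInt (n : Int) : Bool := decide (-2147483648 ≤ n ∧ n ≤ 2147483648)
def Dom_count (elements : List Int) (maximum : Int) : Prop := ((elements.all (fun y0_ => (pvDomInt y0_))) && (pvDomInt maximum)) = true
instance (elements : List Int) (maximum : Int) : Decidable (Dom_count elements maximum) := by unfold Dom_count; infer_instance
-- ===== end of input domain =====

-- B replaces A's prefix-sum pass and reverse stable-placement pass with a direct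
-- value-domain expansion after the counting pass (objective: simpler).

-- ===== PORT A =====
def count (elements : List Int) (maximum : Int) : List Int :=
  let wynik := (PySem.List.pyRange 0 (elements.length : Int) 1).map (fun _ => (0 : Int))
  let counter := (PySem.List.pyRange 0 (maximum + 1) 1).map (fun _ => (0 : Int))
  let counter := elements.foldl
    (fun c e => PySem.List.pySetD c e (PySem.List.pyGetD c e 0 + 1)) counter
  let counter := (PySem.List.pyRange 1 (counter.length : Int) 1).foldl
    (fun c i => PySem.List.pySetD c i (PySem.List.pyGetD c i 0 + PySem.List.pyGetD c (i - 1) 0))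
    counter
  let wc := (PySem.List.pyRange 0 (elements.length : Int) 1).foldl
    (fun wc i =>
      (PySem.List.pySetD wc.1
         (PySem.List.pyGetD wc.2 (PySem.List.pyGetD elements i 0) 0 - 1)
         (PySem.List.pyGetD elements i 0),
       PySem.List.pySetD wc.2 (PySem.List.pyGetD elements i 0)
         (PySem.List.pyGetD wc.2 (PySem.List.pyGetD elements i 0) 0 - 1)))
    (wynik, counter)
  wc.1

-- ===== PORT B =====
def count_alt (elements : List Int) (maximum : Int) : List Int :=
  let counter := (PySem.List.pyRange 0 (maximum + 1) 1).map (fun _ => (0 : Int))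
  let counter := elements.foldl
    (fun c e => PySem.List.pySetD c e (PySem.List.pyGetD c e 0 + 1)) counter
  (PySem.List.pyRange 0 (maximum + 1) 1).foldl
    (fun wynik v => wynik ++ List.replicate (PySem.List.pyGetD counter v 0).toNat v) []

-- ===== PRECONDITION & SPEC =====
-- Pre_ excludes element values above `maximum` (Python IndexError in both programs) and
-- negative element values, where A's Python negative-index wraparound returns an arbitrary
-- unsorted list (not a sort of the input) and B's value is different.
def Pre_count (elements : List Int) (maximum : Int) : Prop :=
  ∀ e ∈ elements, 0 ≤ e ∧ e ≤ maximum
instance (elements : List Int) (maximum : Int) : Decidable (Pre_count elements maximum) := by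
  unfold Pre_count; infer_instance

def pvWitness_count : List Int × Int := ([2, 0, 2, 1], 3)

def Spec_count (elements : List Int) (maximum : Int) (out : List Int) : Prop :=
  out = count_alt elements maximum
instance (elements : List Int) (maximum : Int) (out : List Int) :
    Decidable (Spec_count elements maximum out) := by unfold Spec_count; infer_instance

-- ===== CLAIM (what is proved, stated in full; the proofs are below) =====
def Claim_equal_count : Prop := ∀ (elements : List Int) (maximum : Int),
  Dom_count elements maximum → Pre_count elements maximum →
  Spec_count elements maximum (count elements maximum)

-- ===== LEMMAS AND PROOFS =====

-- the count of value v in xs, and the prefix sums of a Nat-valued table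
def pvPartial (c0 : Nat → Nat) (v : Nat) : Nat := ((List.range v).map c0).sum

-- the first component of A's placement loop
def pvPlace (xs w t : List Int) : List Int :=
  (xs.foldl
    (fun wc e =>
      (PySem.List.pySetD wc.1 (PySem.List.pyGetD wc.2 e 0 - 1) e,
       PySem.List.pySetD wc.2 e (PySem.List.pyGetD wc.2 e 0 - 1)))
    (w, t)).1

-- B's result in closed form
def pvExpand (xs : List Int) (M : Nat) : List Int :=
  (List.range M).flatMap (fun v => List.replicate (xs.count ((v : Nat) : Int)) ((v : Nat) : Int))

lemma pvPartial_succ (c0 : Nat → Nat) (v : Nat) :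
    pvPartial c0 (v + 1) = pvPartial c0 v + c0 v := by
  simp [pvPartial, List.range_succ]

lemma pvPartial_mono (c0 : Nat → Nat) {a b : Nat} (h : a ≤ b) :
    pvPartial c0 a ≤ pvPartial c0 b := by
  induction b, h using Nat.le_induction with
  | base => exact le_rfl
  | succ b hb ih => rw [pvPartial_succ]; omega

lemma set_map_range {M k : Nat} (g : Nat → Int) (x : Int) (_hk : k < M) :
    ((List.range M).map g).set k x = (List.range M).map (fun v => if v = k then x else g v) := by
  apply List.ext_getElem
  · simp
  · intro i h1 h2
    simp only [List.getElem_set, List.getElem_map, List.getElem_range]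
    rcases eq_or_ne k i with h | h
    · simp [h]
    · simp [h, Ne.symm h]

lemma getD_map_range {M k : Nat} (g : Nat → Int) (d : Int) (hk : k < M) :
    PySem.List.pyGetD ((List.range M).map g) ((k : Nat) : Int) d = g k := by
  rw [PySem.List.pyGetD_eq_getElem _ _ (by positivity) (by simpa using (by exact_mod_cast hk : ((k : Nat) : Int) < (M : Int)))]
  simp

lemma count_cons_self' (e : Int) (xs : List Int) (he0 : 0 ≤ e) :
    (e :: xs).count ((e.toNat : Nat) : Int) = xs.count ((e.toNat : Nat) : Int) + 1 := by
  rw [Int.toNat_of_nonneg he0, List.count_cons]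
  simp

lemma count_cons_ne' (e : Int) (xs : List Int) (v : Nat) (he0 : 0 ≤ e) (hv : v ≠ e.toNat) :
    (e :: xs).count ((v : Nat) : Int) = xs.count ((v : Nat) : Int) := by
  rw [List.count_cons]
  have hne : (e == ((v : Nat) : Int)) = false := by
    rw [beq_eq_false_iff_ne]
    intro hh
    apply hv
    have h2 : ((v : Nat) : Int) = ((e.toNat : Nat) : Int) := by
      rw [Int.toNat_of_nonneg he0]
      exact hh.symm
    exact_mod_cast h2
  simp [hne]

-- counting phase: the table after `for element in elements: counter[element] += 1`
lemma stage1 (M : Nat) (xs : List Int) : ∀ (g : Nat → Int),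
    (∀ e ∈ xs, 0 ≤ e ∧ e < (M : Int)) →
    xs.foldl (fun c e => PySem.List.pySetD c e (PySem.List.pyGetD c e 0 + 1))
      ((List.range M).map g)
    = (List.range M).map (fun v => g v + ((xs.count ((v : Nat) : Int) : Nat) : Int)) := by
  induction xs with
  | nil => intro g h; simp
  | cons e xs ih =>
    intro g h
    obtain ⟨he0, heM⟩ := h e (List.mem_cons_self)
    have hek : ((e.toNat : Nat) : Int) = e := Int.toNat_of_nonneg he0
    have hkM : e.toNat < M := by omega
    simp only [List.foldl_cons]
    rw [show PySem.List.pyGetD ((List.range M).map g) e 0 = g e.toNat by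
        rw [← hek]; exact getD_map_range g 0 hkM]
    rw [PySem.List.pySetD_of_nonneg _ _ he0]
    rw [set_map_range g _ hkM]
    rw [ih _ (fun e' he' => h e' (List.mem_cons_of_mem _ he'))]
    apply List.map_congr_left
    intro v hv
    by_cases hvk : v = e.toNat
    · subst hvk
      rw [count_cons_self' e xs he0, if_pos rfl]
      push_cast
      ring
    · rw [count_cons_ne' e xs v he0 hvk]
      simp [hvk]

-- prefix phase: the table after `for i in range(1, len(counter)): counter[i] += counter[i-1]`
lemma stage2 (M : Nat) (c0 : Nat → Nat) : ∀ (j : Nat), j ≤ M →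
    (PySem.List.pyRange 1 ((j : Nat) : Int) 1).foldl
      (fun c i => PySem.List.pySetD c i (PySem.List.pyGetD c i 0 + PySem.List.pyGetD c (i - 1) 0))
      ((List.range M).map (fun v => ((c0 v : Nat) : Int)))
    = (List.range M).map (fun v => if v < j then ((pvPartial c0 (v + 1) : Nat) : Int) else ((c0 v : Nat) : Int)) := by
  intro j
  induction j with
  | zero =>
    intro _
    rw [PySem.List.pyRange_one_eq_nil (by norm_num)]
    simp
  | succ j ih =>
    intro hjM
    by_cases hj : j = 0
    · subst hj
      rw [PySem.List.pyRange_one_eq_nil (by norm_num)]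
      simp only [List.foldl_nil]
      apply List.map_congr_left
      intro v hv
      by_cases hv1 : v < 1
      · have : v = 0 := by omega
        subst this
        simp [hv1, pvPartial, List.range_succ]
      · simp [hv1]
    · have h1j : 1 ≤ j := by omega
      have hjM' : j < M := by omega
      rw [show (((j + 1 : Nat)) : Int) = ((j : Nat) : Int) + 1 by push_cast; ring]
      rw [PySem.List.pyRange_one_succ_right (by exact_mod_cast h1j)]
      rw [List.foldl_append]
      rw [ih (by omega)]
      simp only [List.foldl_cons, List.foldl_nil]
      rw [show PySem.List.pyGetD ((List.range M).map (fun v => if v < j then ((pvPartial c0 (v + 1) : Nat) : Int) else ((c0 v : Nat) : Int))) ((j : Nat) : Int) 0 = ((c0 j : Nat) : Int) by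
        rw [getD_map_range _ 0 hjM']; simp]
      rw [show ((j : Nat) : Int) - 1 = (((j - 1 : Nat)) : Int) by omega]
      rw [show PySem.List.pyGetD ((List.range M).map (fun v => if v < j then ((pvPartial c0 (v + 1) : Nat) : Int) else ((c0 v : Nat) : Int))) (((j - 1 : Nat)) : Int) 0 = ((pvPartial c0 j : Nat) : Int) by
        rw [getD_map_range _ 0 (by omega : j - 1 < M)]
        rw [if_pos (by omega : j - 1 < j)]
        rw [show j - 1 + 1 = j by omega]]
      rw [PySem.List.pySetD_of_nonneg _ _ (by positivity)]
      rw [show (((j : Nat) : Int)).toNat = j by omega]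
      rw [show ((c0 j : Nat) : Int) + ((pvPartial c0 j : Nat) : Int) = ((pvPartial c0 (j + 1) : Nat) : Int) by
        rw [pvPartial_succ]; push_cast; ring]
      rw [set_map_range _ _ hjM']
      apply List.map_congr_left
      intro v hv
      by_cases hvj : v = j
      · subst hvj; simp
      · by_cases hvj' : v < j
        · rw [if_neg hvj, if_pos hvj', if_pos (by omega)]
        · rw [if_neg hvj, if_neg hvj', if_neg (by omega)]

lemma pvPlace_cons (e : Int) (xs w t : List Int) :
    pvPlace (e :: xs) w t =
      pvPlace xs (PySem.List.pySetD w (PySem.List.pyGetD t e 0 - 1) e)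
        (PySem.List.pySetD t e (PySem.List.pyGetD t e 0 - 1)) := rfl

-- placement phase: value bands of the output array
lemma stage3 (M : Nat) (xs : List Int) : ∀ (w : List Int) (F : Nat → Nat),
    (∀ e ∈ xs, 0 ≤ e ∧ e < (M : Int)) →
    (∀ v, v < M → xs.count ((v : Nat) : Int) ≤ F v ∧ F v ≤ w.length) →
    (∀ u v, u < v → v < M → F u ≤ F v - xs.count ((v : Nat) : Int)) →
    (pvPlace xs w ((List.range M).map (fun v => ((F v : Nat) : Int)))).length = w.length ∧
    (∀ v j, v < M → F v - xs.count ((v : Nat) : Int) ≤ j → j < F v →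
      (pvPlace xs w ((List.range M).map (fun v => ((F v : Nat) : Int))))[j]? = some ((v : Nat) : Int)) ∧
    (∀ j : Nat, (∀ v, v < M → ¬(F v - xs.count ((v : Nat) : Int) ≤ j ∧ j < F v)) →
      (pvPlace xs w ((List.range M).map (fun v => ((F v : Nat) : Int))))[j]? = w[j]?) := by
  induction xs with
  | nil =>
    intro w F _ _ _
    refine ⟨rfl, ?_, fun _ _ => rfl⟩
    intro v j _ hlow hhigh
    simp only [List.count_nil] at hlow
    omega
  | cons e xs ih =>
    intro w F hx hb hd
    obtain ⟨he0, heM⟩ := hx e (List.mem_cons_self)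
    have hek : ((e.toNat : Nat) : Int) = e := Int.toNat_of_nonneg he0
    have hkM : e.toNat < M := by omega
    have hcs := count_cons_self' e xs he0
    have hck : 1 ≤ (e :: xs).count ((e.toNat : Nat) : Int) := by omega
    have hFk1 : 1 ≤ F e.toNat := le_trans hck (hb e.toNat hkM).1
    -- compute one step of the fold
    rw [pvPlace_cons]
    rw [show PySem.List.pyGetD ((List.range M).map (fun v => ((F v : Nat) : Int))) e 0 = ((F e.toNat : Nat) : Int) by
      rw [← hek]; exact getD_map_range _ 0 hkM]
    rw [show ((F e.toNat : Nat) : Int) - 1 = (((F e.toNat - 1 : Nat)) : Int) by omega]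
    rw [PySem.List.pySetD_of_nonneg _ _ (by positivity),
        PySem.List.pySetD_of_nonneg _ _ he0]
    rw [show ((((F e.toNat - 1 : Nat)) : Int)).toNat = F e.toNat - 1 by omega]
    rw [set_map_range _ _ hkM]
    rw [show (List.range M).map (fun v => if v = e.toNat then (((F e.toNat - 1 : Nat)) : Int) else ((F v : Nat) : Int))
          = (List.range M).map (fun v => (((if v = e.toNat then F e.toNat - 1 else F v : Nat)) : Int)) by
      apply List.map_congr_left; intro v _; by_cases hv : v = e.toNat <;> simp [hv]]
    set F1 : Nat → Nat := fun v => if v = e.toNat then F e.toNat - 1 else F v with hF1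
    set w1 : List Int := w.set (F e.toNat - 1) e with hw1
    have hxs : ∀ e' ∈ xs, 0 ≤ e' ∧ e' < (M : Int) :=
      fun e' he' => hx e' (List.mem_cons_of_mem _ he')
    have hlen1 : w1.length = w.length := by rw [hw1, List.length_set]
    have hb1 : ∀ v, v < M → xs.count ((v : Nat) : Int) ≤ F1 v ∧ F1 v ≤ w1.length := by
      intro v hvM
      obtain ⟨hb1', hb2'⟩ := hb v hvM
      by_cases hv : v = e.toNat
      · subst hv
        simp only [hF1, if_pos rfl, hlen1]
        omega
      · have hcv := count_cons_ne' e xs v he0 hv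
        simp only [hF1, if_neg hv, hlen1]
        omega
    have hd1 : ∀ u v, u < v → v < M → F1 u ≤ F1 v - xs.count ((v : Nat) : Int) := by
      intro u v huv hvM
      have hduv := hd u v huv hvM
      by_cases hu : u = e.toNat
      · have hv : v ≠ e.toNat := by omega
        have hcv := count_cons_ne' e xs v he0 hv
        subst hu
        simp only [hF1, if_pos rfl, if_neg hv]
        omega
      · by_cases hv : v = e.toNat
        · subst hv
          simp only [hF1, if_neg hu, if_pos rfl]
          omega
        · have hcv := count_cons_ne' e xs v he0 hv
          simp only [hF1, if_neg hu, if_neg hv]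
          omega
    obtain ⟨ihlen, ihA, ihB⟩ := ih w1 F1 hxs hb1 hd1
    have hFkw : F e.toNat ≤ w.length := (hb e.toNat hkM).2
    refine ⟨?_, ?_, ?_⟩
    · rw [ihlen, hlen1]
    · intro v j hvM hlow hhigh
      by_cases hvk : v = e.toNat
      · subst hvk
        by_cases hj : j = F e.toNat - 1
        · subst hj
          rw [ihB]
          · rw [hw1, List.getElem?_set_self (by omega), hek]
          · intro v' hv'M
            by_cases hv'k : v' = e.toNat
            · subst hv'k
              simp only [hF1, if_pos rfl]
              omega
            · have hcv' := count_cons_ne' e xs v' he0 hv'k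
              simp only [hF1, if_neg hv'k]
              rcases lt_trichotomy v' e.toNat with h | h | h
              · have := hd v' e.toNat h hkM
                omega
              · exact absurd h hv'k
              · have := hd e.toNat v' h hv'M
                omega
        · exact ihA e.toNat j hkM (by simp only [hF1, if_pos rfl]; omega)
            (by simp only [hF1, if_pos rfl]; omega)
      · have hcv := count_cons_ne' e xs v he0 hvk
        exact ihA v j hvM (by simp only [hF1, if_neg hvk]; omega)
          (by simp only [hF1, if_neg hvk]; omega)
    · intro j hj
      have hjk := hj e.toNat hkM
      rw [ihB]
      · rw [hw1, List.getElem?_set_ne (by omega)]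
      · intro v hvM
        have := hj v hvM
        by_cases hv : v = e.toNat
        · subst hv
          simp only [hF1, if_pos rfl]
          omega
        · have hcv := count_cons_ne' e xs v he0 hv
          simp only [hF1, if_neg hv]
          omega

-- an indicator summed over range M
lemma sum_ind (M k : Nat) (f : Nat → Nat) (hk : k < M) :
    ((List.range M).map (fun v => f v + if v = k then 1 else 0)).sum
      = ((List.range M).map f).sum + 1 := by
  induction M with
  | zero => omega
  | succ M ih =>
    rw [List.range_succ, List.map_append, List.map_append, List.sum_append, List.sum_append]
    by_cases hkM : k < M
    · rw [ih hkM]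
      have : M ≠ k := by omega
      simp [this]
      omega
    · have hkM' : k = M := by omega
      subst hkM'
      have : (List.range k).map (fun v => f v + if v = k then 1 else 0) = (List.range k).map f := by
        apply List.map_congr_left
        intro v hv
        have : v < k := List.mem_range.mp hv
        simp [show v ≠ k by omega]
      rw [this]
      simp
      omega

-- totality: the counts of the values 0..M-1 exhaust xs
lemma sum_counts (M : Nat) (xs : List Int) (h : ∀ e ∈ xs, 0 ≤ e ∧ e < (M : Int)) :
    pvPartial (fun v => xs.count ((v : Nat) : Int)) M = xs.length := by
  induction xs with
  | nil => simp [pvPartial]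
  | cons e xs ih =>
    obtain ⟨he0, heM⟩ := h e (List.mem_cons_self)
    have hek : ((e.toNat : Nat) : Int) = e := Int.toNat_of_nonneg he0
    have hkM : e.toNat < M := by omega
    have hcount : ∀ v : Nat, (e :: xs).count ((v : Nat) : Int)
        = xs.count ((v : Nat) : Int) + (if v = e.toNat then 1 else 0) := by
      intro v
      by_cases hv : v = e.toNat
      · subst hv
        rw [count_cons_self' e xs he0]
        simp
      · rw [count_cons_ne' e xs v he0 hv]
        simp [hv]
    unfold pvPartial
    rw [show (List.range M).map (fun v => (e :: xs).count ((v : Nat) : Int))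
          = (List.range M).map (fun v => xs.count ((v : Nat) : Int) + if v = e.toNat then 1 else 0) by
      apply List.map_congr_left; intro v _; exact hcount v]
    rw [sum_ind M e.toNat _ hkM]
    have := ih (fun e' he' => h e' (List.mem_cons_of_mem _ he'))
    unfold pvPartial at this
    simp [this]

lemma exists_band (c0 : Nat → Nat) : ∀ (M j : Nat), j < pvPartial c0 M →
    ∃ v, v < M ∧ pvPartial c0 v ≤ j ∧ j < pvPartial c0 (v + 1) := by
  intro M
  induction M with
  | zero => intro j h; simp [pvPartial] at h
  | succ M ih =>
    intro j h
    by_cases hj : j < pvPartial c0 M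
    · obtain ⟨v, h1, h2, h3⟩ := ih j hj
      exact ⟨v, by omega, h2, h3⟩
    · exact ⟨M, by omega, by omega, h⟩

lemma expand_length (xs : List Int) (M : Nat) :
    (pvExpand xs M).length = pvPartial (fun v => xs.count ((v : Nat) : Int)) M := by
  induction M with
  | zero => simp [pvExpand, pvPartial]
  | succ M ih =>
    rw [pvExpand, List.range_succ, List.flatMap_append, List.length_append, pvPartial_succ]
    simp only [List.flatMap_cons, List.flatMap_nil, List.append_nil, List.length_replicate]
    rw [← pvExpand, ih]

lemma expand_get (xs : List Int) (M v j : Nat) (hvM : v < M)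
    (hlow : pvPartial (fun u => xs.count ((u : Nat) : Int)) v ≤ j)
    (hhigh : j < pvPartial (fun u => xs.count ((u : Nat) : Int)) (v + 1)) :
    (pvExpand xs M)[j]? = some ((v : Nat) : Int) := by
  induction M with
  | zero => omega
  | succ M ih =>
    rw [pvExpand, List.range_succ, List.flatMap_append]
    simp only [List.flatMap_cons, List.flatMap_nil, List.append_nil]
    rw [← pvExpand]
    by_cases hvM' : v < M
    · rw [List.getElem?_append_left]
      · exact ih hvM'
      · rw [expand_length]
        calc j < pvPartial (fun u => xs.count ((u : Nat) : Int)) (v + 1) := hhigh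
          _ ≤ pvPartial (fun u => xs.count ((u : Nat) : Int)) M := pvPartial_mono _ (by omega)
    · have hvM'' : v = M := by omega
      subst hvM''
      rw [List.getElem?_append_right (by rw [expand_length]; omega)]
      rw [expand_length, List.getElem?_replicate]
      rw [if_pos (by have := pvPartial_succ (fun u => xs.count ((u : Nat) : Int)) v; omega)]

lemma flatMap_congr_mem {l : List Nat} {f g : Nat → List Int}
    (h : ∀ v ∈ l, f v = g v) : l.flatMap f = l.flatMap g := by
  induction l with
  | nil => rfl
  | cons x xs ih =>
    simp only [List.flatMap_cons]
    rw [h x (List.mem_cons_self), ih (fun v hv => h v (List.mem_cons_of_mem _ hv))]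

-- the main equivalence
lemma main_eq (elements : List Int) (maximum : Int)
    (hpre : ∀ e ∈ elements, 0 ≤ e ∧ e ≤ maximum) :
    count elements maximum = count_alt elements maximum := by
  by_cases hne : elements = []
  · subst hne
    have hA : count ([] : List Int) maximum = [] := by
      simp only [count]
      rw [show ((([] : List Int).length : Nat) : Int) = 0 by simp]
      rw [PySem.List.pyRange_one_eq_nil le_rfl]
      simp
    have hB : count_alt ([] : List Int) maximum = [] := by
      simp only [count_alt, List.foldl_nil]
      rw [PySem.List.foldl_append_eq_flatMap, List.nil_append]
      rw [List.flatMap_eq_nil_iff.mpr]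
      intro v hv
      obtain ⟨hv0, hv1⟩ := PySem.List.mem_pyRange_one.mp hv
      rw [PySem.List.pyGetD_map_pyRange_of_nonneg _ _ _ _ hv0 hv1]
      simp
    rw [hA, hB]
  · obtain ⟨e0, he0⟩ := List.exists_mem_of_ne_nil elements hne
    have hmax : 0 ≤ maximum := by
      have := hpre e0 he0
      omega
    have hMI : (((maximum + 1).toNat : Nat) : Int) = maximum + 1 := by omega
    have hbound : ∀ e ∈ elements, 0 ≤ e ∧ e < (((maximum + 1).toNat : Nat) : Int) := by
      intro e he
      have := hpre e he
      omega
    have hsum : pvPartial (fun u => elements.count ((u : Nat) : Int)) (maximum + 1).toNat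
        = elements.length := sum_counts (maximum + 1).toNat elements hbound
    have houter : PySem.List.pyRange 0 (maximum + 1) 1
        = (List.range (maximum + 1).toNat).map (fun k => ((k : Nat) : Int)) := by
      conv_lhs => rw [← hMI]
      exact PySem.List.pyRange_zero_nat _
    have hcnt : elements.foldl (fun c e => PySem.List.pySetD c e (PySem.List.pyGetD c e 0 + 1))
        ((PySem.List.pyRange 0 (maximum + 1) 1).map (fun _ => (0 : Int)))
        = (List.range (maximum + 1).toNat).map
            (fun v => ((elements.count ((v : Nat) : Int) : Nat) : Int)) := by
      rw [houter, List.map_map]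
      rw [stage1 (maximum + 1).toNat elements _ hbound]
      apply List.map_congr_left
      intro v _
      simp
    have hw0 : ((PySem.List.pyRange 0 ((elements.length : Nat) : Int) 1).map
        (fun _ => (0 : Int))).length = elements.length := by
      rw [List.length_map, PySem.List.length_pyRange_one]
      omega
    have hAeq : count elements maximum
        = pvPlace elements
            ((PySem.List.pyRange 0 ((elements.length : Nat) : Int) 1).map (fun _ => (0 : Int)))
            ((List.range (maximum + 1).toNat).map
              (fun v => ((pvPartial (fun u => elements.count ((u : Nat) : Int)) (v + 1) : Nat) : Int))) := by
      simp only [count]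
      rw [hcnt]
      rw [List.length_map, List.length_range]
      rw [stage2 (maximum + 1).toNat (fun u => elements.count ((u : Nat) : Int)) (maximum + 1).toNat le_rfl]
      rw [show (List.range (maximum + 1).toNat).map
            (fun v => if v < (maximum + 1).toNat
              then ((pvPartial (fun u => elements.count ((u : Nat) : Int)) (v + 1) : Nat) : Int)
              else ((elements.count ((v : Nat) : Int) : Nat) : Int))
          = (List.range (maximum + 1).toNat).map
              (fun v => ((pvPartial (fun u => elements.count ((u : Nat) : Int)) (v + 1) : Nat) : Int)) by
        apply List.map_congr_left
        intro v hv
        rw [if_pos (List.mem_range.mp hv)]]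
      rw [PySem.List.foldl_pyRange_zero_pyGetD' elements 0
        (fun wc e => (PySem.List.pySetD wc.1 (PySem.List.pyGetD wc.2 e 0 - 1) e,
          PySem.List.pySetD wc.2 e (PySem.List.pyGetD wc.2 e 0 - 1)))]
      rfl
    have hBeq : count_alt elements maximum = pvExpand elements (maximum + 1).toNat := by
      simp only [count_alt]
      rw [hcnt]
      rw [houter]
      rw [PySem.List.foldl_append_eq_flatMap, List.nil_append]
      rw [List.flatMap_map]
      unfold pvExpand
      apply flatMap_congr_mem
      intro v hv
      rw [getD_map_range _ 0 (List.mem_range.mp hv)]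
      simp
    rw [hAeq, hBeq]
    obtain ⟨hlen3, hbandA, _⟩ :=
      stage3 (maximum + 1).toNat elements
        ((PySem.List.pyRange 0 ((elements.length : Nat) : Int) 1).map (fun _ => (0 : Int)))
        (fun v => pvPartial (fun u => elements.count ((u : Nat) : Int)) (v + 1))
        hbound
        (by
          intro v hv
          have hsucc := pvPartial_succ (fun u => elements.count ((u : Nat) : Int)) v
          have hmono := pvPartial_mono (fun u => elements.count ((u : Nat) : Int))
            (show v + 1 ≤ (maximum + 1).toNat by omega)
          beta_reduce
          rw [hw0]
          omega)
        (by
          intro u v huv hvM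
          have hsv := pvPartial_succ (fun u => elements.count ((u : Nat) : Int)) v
          have hmono := pvPartial_mono (fun u => elements.count ((u : Nat) : Int))
            (show u + 1 ≤ v by omega)
          beta_reduce
          omega)
    apply List.ext_getElem?
    intro i
    by_cases hi : i < elements.length
    · obtain ⟨v, hvM, hlo, hhi⟩ :=
        exists_band (fun u => elements.count ((u : Nat) : Int)) (maximum + 1).toNat i
          (by rw [hsum]; exact hi)
      have hsucc := pvPartial_succ (fun u => elements.count ((u : Nat) : Int)) v
      rw [hbandA v i hvM (by omega) (by omega)]
      rw [expand_get elements (maximum + 1).toNat v i hvM hlo hhi]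
    · rw [List.getElem?_eq_none (by rw [hlen3, hw0]; omega),
          List.getElem?_eq_none (by rw [expand_length, hsum]; omega)]

-- ===== VERDICT (by name: the statement is the Claim_ definition above) =====
theorem count_spec : Claim_equal_count := by
  intro elements maximum _ hpre
  unfold Spec_count
  exact main_eq elements maximum hpre
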